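-- pv_equiv track=rewrite | github.com/chian/nano-graphrag | generate_reasoning_qa_gasl.py | infer_relationships_from_entities
-- ===== SOURCE A (Python) =====
-- def infer_relationships_from_entities(entities: list):
--     """Infer relationships between entities based on their content."""
--
--     relationships = []
--
--     # Simple heuristic: if entities share keywords, they might be related
--     for i, entity1 in enumerate(entities[:5]):  # Limit to avoid too many relationships
--         for entity2 in entities[i+1:]:
--             # Check if entities share biological keywords
--             if share_biological_keywords(entity1, entity2):
--                 relationships.append({
--                     'from': entity1.get('simple_id', f'node_{i+1}'),
--                     'to': entity2.get('simple_id', f'node_{i+2}'),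
--                     'relationship': 'biologically related'
--                 })
--
--     return relationships
--
-- def share_biological_keywords(entity1: dict, entity2: dict):
--     """Check if two entities share biological keywords."""
--
--     text1 = f"{entity1.get('label', '')} {entity1.get('description', '')}".lower()
--     text2 = f"{entity2.get('label', '')} {entity2.get('description', '')}".lower()
--
--     # Common biological keywords
--     bio_keywords = [
--         'bacteria', 'antibiotic', 'resistance', 'infection', 'therapy', 'treatment',
--         'strain', 'pathogen', 'microbial', 'phage', 'drug', 'mechanism'
--     ]
--
--     for keyword in bio_keywords:
--         if keyword in text1 and keyword in text2:
--             return True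
--
--     return False
-- ===== SOURCE B (Python) =====
-- def infer_relationships_from_entities(entities: list):
--     """Infer relationships between entities based on their content.
--
--     Different decomposition: a first pass builds a keyword index (the list of
--     bio keywords occurring in each entity's text); the pairs are then produced
--     by a single index-based comprehension over (i, j) ranges that intersects
--     the precomputed keyword lists, instead of nested accumulator loops that
--     re-scan the raw texts per pair."""
--
--     bio_keywords = [
--         'bacteria', 'antibiotic', 'resistance', 'infection', 'therapy', 'treatment',
--         'strain', 'pathogen', 'microbial', 'phage', 'drug', 'mechanism'
--     ]
--
--     def keywords_of(entity):
--         text = f"{entity.get('label', '')} {entity.get('description', '')}".lower()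
--         return [k for k in bio_keywords if k in text]
--
--     kw = [keywords_of(e) for e in entities]
--     n = len(entities)
--     return [
--         {'from': entities[i].get('simple_id', f'node_{i+1}'),
--          'to': entities[j].get('simple_id', f'node_{i+2}'),
--          'relationship': 'biologically related'}
--         for i in range(min(5, n))
--         for j in range(i + 1, n)
--         if any(k in kw[j] for k in kw[i])
--     ]
-- ===== Notes on version B (the rewrite author's own statement) =====
-- stated objective: alternative
-- what changed: B first builds a keyword index (one pass mapping each entity to its list of matching bio keywords) and then emits the pairs by a single index-based comprehension over ranges that intersects the precomputed keyword lists, replacing A's nested accumulator loops that re-scan both raw texts against all 12 keywords per pair.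
import Mathlib
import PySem

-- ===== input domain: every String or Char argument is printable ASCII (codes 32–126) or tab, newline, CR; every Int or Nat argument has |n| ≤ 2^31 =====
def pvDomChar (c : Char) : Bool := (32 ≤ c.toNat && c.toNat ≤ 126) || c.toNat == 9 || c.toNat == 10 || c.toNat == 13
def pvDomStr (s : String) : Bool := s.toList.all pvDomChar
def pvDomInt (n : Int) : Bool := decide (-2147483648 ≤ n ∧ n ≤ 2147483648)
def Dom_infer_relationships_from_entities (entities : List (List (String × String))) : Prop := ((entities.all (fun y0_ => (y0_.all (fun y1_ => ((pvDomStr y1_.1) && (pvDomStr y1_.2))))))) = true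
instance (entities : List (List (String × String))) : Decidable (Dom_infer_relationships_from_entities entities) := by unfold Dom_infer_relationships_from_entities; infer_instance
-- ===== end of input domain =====

-- B builds a keyword index in a first pass and emits the pairs by an index-based
-- comprehension over ranges intersecting the precomputed keyword lists (same values).

-- shared literal context (identical lines in both Pythons): the keyword list and
-- the lowercased "label description" text
def bioKeywords : List String :=
  ["bacteria", "antibiotic", "resistance", "infection", "therapy", "treatment",
   "strain", "pathogen", "microbial", "phage", "drug", "mechanism"]

def entityText (e : List (String × String)) : String :=
  PySem.Str.lower ((PySem.Dict.getD (PySem.Dict.mk e) "label" "") ++ " " ++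
                   (PySem.Dict.getD (PySem.Dict.mk e) "description" ""))

-- ===== PORT A =====
-- share_biological_keywords: loop over the 12 keywords, early return True on a shared one
def shareBiologicalKeywords (e1 e2 : List (String × String)) : Bool :=
  bioKeywords.any (fun k => PySem.Str.isIn k (entityText e1) && PySem.Str.isIn k (entityText e2))

-- the appended relationship dict, with the f'node_{i+1}' / f'node_{i+2}' fallbacks
def mkRel (e1 e2 : List (String × String)) (i : Int) : List (String × String) :=
  [("from", PySem.Dict.getD (PySem.Dict.mk e1) "simple_id" ("node_" ++ PySem.Int.toStr (i + 1))),
   ("to",   PySem.Dict.getD (PySem.Dict.mk e2) "simple_id" ("node_" ++ PySem.Int.toStr (i + 2))),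
   ("relationship", "biologically related")]

def infer_relationships_from_entities (entities : List (List (String × String))) : List (List (String × String)) :=
  (PySem.List.enumerate (PySem.List.slice entities none (some 5))).foldl
    (fun rels ie =>
      (PySem.List.slice entities (some (ie.1 + 1)) none).foldl
        (fun rels e2 =>
          if shareBiologicalKeywords ie.2 e2 then rels ++ [mkRel ie.2 e2 ie.1] else rels)
        rels)
    []

-- ===== PORT B =====
-- keywords_of: the per-entity list of matching bio keywords, computed once per entity
def keywordsOf (e : List (String × String)) : List String :=
  bioKeywords.filter (fun k => PySem.Str.isIn k (entityText e))

def infer_relationships_from_entities_alt (entities : List (List (String × String))) : List (List (String × String)) :=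
  let kw := entities.map keywordsOf
  let n : Int := PySem.List.len entities
  (PySem.List.pyRange 0 (min 5 n)).flatMap (fun i =>
    (PySem.List.pyRange (i + 1) n).flatMap (fun j =>
      if (PySem.List.pyGetD kw i []).any (fun k => (PySem.List.pyGetD kw j []).contains k) then
        [[("from", PySem.Dict.getD (PySem.Dict.mk (PySem.List.pyGetD entities i [])) "simple_id"
             ("node_" ++ PySem.Int.toStr (i + 1))),
          ("to", PySem.Dict.getD (PySem.Dict.mk (PySem.List.pyGetD entities j [])) "simple_id"
             ("node_" ++ PySem.Int.toStr (i + 2))),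
          ("relationship", "biologically related")]]
      else []))

-- ===== PRECONDITION & SPEC =====
def Spec_infer_relationships_from_entities (entities : List (List (String × String))) (out : List (List (String × String))) : Prop := out = infer_relationships_from_entities_alt entities
instance (entities : List (List (String × String))) (out : List (List (String × String))) : Decidable (Spec_infer_relationships_from_entities entities out) := by unfold Spec_infer_relationships_from_entities; infer_instance

-- ===== CLAIM (what is proved, stated in full; the proofs are below) =====
def Claim_equal_infer_relationships_from_entities : Prop := ∀ (entities : List (List (String × String))), Dom_infer_relationships_from_entities entities → Spec_infer_relationships_from_entities entities (infer_relationships_from_entities entities)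

-- ===== LEMMAS AND PROOFS =====

-- a comprehension with a filter clause: flatMap of if-singleton is filter-then-map
theorem flatMap_ite_singleton {α β : Type} (p : α → Bool) (f : α → β) (xs : List α) :
    xs.flatMap (fun x => if p x then [f x] else []) = (xs.filter p).map f := by
  induction xs with
  | nil => rfl
  | cons x xs ih => by_cases h : p x <;> simp [List.flatMap_cons, h, ih]

-- the keyword index of the pyGetD default entity is empty (its text is a single space)
theorem keywordsOf_nil : keywordsOf [] = [] := by decide

-- the pair test of A equals the intersection test of B on the precomputed indexes
theorem share_eq_index (e1 e2 : List (String × String)) :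
    shareBiologicalKeywords e1 e2
      = (keywordsOf e1).any (fun k => (keywordsOf e2).contains k) := by
  unfold shareBiologicalKeywords keywordsOf
  rw [List.any_filter]
  refine Bool.eq_iff_iff.mpr ?_
  simp only [List.any_eq_true, Bool.and_eq_true, List.contains_iff_mem, List.mem_filter]
  constructor
  · rintro ⟨k, hk, h1, h2⟩; exact ⟨k, hk, h1, hk, h2⟩
  · rintro ⟨k, hk, h1, _, h2⟩; exact ⟨k, hk, h1, h2⟩

-- ===== VERDICT (by name: the statement is the Claim_ definition above) =====
set_option maxHeartbeats 1000000 in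
theorem infer_relationships_from_entities_spec : Claim_equal_infer_relationships_from_entities := by
  intro entities _
  show infer_relationships_from_entities entities = infer_relationships_from_entities_alt entities
  unfold infer_relationships_from_entities infer_relationships_from_entities_alt
  -- A: accumulator loops → flatMap over the enumerated prefix
  simp only [PySem.List.foldl_append_if, PySem.List.foldl_append_eq_flatMap, List.nil_append]
  -- enumerated prefix → index range
  rw [PySem.List.enumerate_eq_map_pyRange (PySem.List.slice entities none (some 5)) [],
      List.flatMap_map]
  have hM : PySem.List.len (PySem.List.slice entities none (some 5))
      = min 5 (PySem.List.len entities) := by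
    rw [PySem.List.slice_to entities (by omega)]
    simp [PySem.List.len_eq]
  rw [hM]
  refine List.flatMap_congr ?_
  intro i hi
  obtain ⟨h0i, hiM⟩ := (PySem.List.mem_pyRange_one).mp hi
  have hlen : PySem.List.len entities = ((entities.length : Int)) := PySem.List.len_eq entities
  have hiN : i < (entities.length : Int) := by omega
  -- the enumerated entity is entities[i]
  have he1 : PySem.List.pyGetD (PySem.List.slice entities none (some 5)) i []
      = PySem.List.pyGetD entities i [] := by
    rw [PySem.List.slice_to entities (by omega),
        PySem.List.pyGetD_eq_getElem _ _ h0i (by simp [PySem.List.len_eq] at *; omega),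
        PySem.List.pyGetD_eq_getElem _ _ h0i (by simp at *; omega)]
    simp
  rw [he1]
  -- B inner: kw[i], kw[j] → keywordsOf entities[·]
  have hkw : ∀ (t : Int), PySem.List.pyGetD (entities.map keywordsOf) t []
      = keywordsOf (PySem.List.pyGetD entities t []) := by
    intro t
    rw [← keywordsOf_nil, PySem.List.pyGetD_map]
  simp only [hkw]
  -- B inner range over j → flatMap over the dropped suffix, then filter-map
  have hmap : (PySem.List.pyRange (i + 1) (PySem.List.len entities)).map
      (fun j => PySem.List.pyGetD entities j []) = entities.drop (i + 1).toNat :=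
    PySem.List.map_pyGetD_pyRange entities [] (by omega)
  rw [← List.flatMap_map (fun j => PySem.List.pyGetD entities j [])
        (fun e2 =>
          if (keywordsOf (PySem.List.pyGetD entities i [])).any
               (fun k => (keywordsOf e2).contains k) then
            [[("from", PySem.Dict.getD (PySem.Dict.mk (PySem.List.pyGetD entities i [])) "simple_id"
                 ("node_" ++ PySem.Int.toStr (i + 1))),
              ("to", PySem.Dict.getD (PySem.Dict.mk e2) "simple_id"
                 ("node_" ++ PySem.Int.toStr (i + 2))),
              ("relationship", "biologically related")]]
          else [])
        (PySem.List.pyRange (i + 1) (PySem.List.len entities)),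
      hmap, flatMap_ite_singleton,
      PySem.List.slice_from entities (show (0:Int) ≤ i + 1 by omega)]
  simp only [mkRel]
  refine congrArg _ (congrArg₂ List.filter ?_ rfl)
  funext e2
  exact share_eq_index _ e2
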